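-- pv_equiv track=rewrite | github.com/xfrnk2/archived-prev-1d1c-repo | codesignal/5_shapearea.py | shapeArea
-- ===== SOURCE A (Python) =====
-- def shapeArea(n):
--     if n <= 1:
--         return n
--     result = 1+4*(n-1)
--     if 2 < n:
--         while 0 < n-2:
--             result += (n-2)*4
--             n -= 1
--     return result
-- ===== SOURCE B (Python) =====
-- def shapeArea(n):
--     if n <= 1:
--         return n
--     return 2 * n * n - 2 * n + 1
-- ===== Notes on version B (the rewrite author's own statement) =====
-- stated objective: faster
-- what changed: Replaced the O(n) accumulation loop with the closed-form formula 2n^2-2n+1 for the centered-square area.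
import Mathlib
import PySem

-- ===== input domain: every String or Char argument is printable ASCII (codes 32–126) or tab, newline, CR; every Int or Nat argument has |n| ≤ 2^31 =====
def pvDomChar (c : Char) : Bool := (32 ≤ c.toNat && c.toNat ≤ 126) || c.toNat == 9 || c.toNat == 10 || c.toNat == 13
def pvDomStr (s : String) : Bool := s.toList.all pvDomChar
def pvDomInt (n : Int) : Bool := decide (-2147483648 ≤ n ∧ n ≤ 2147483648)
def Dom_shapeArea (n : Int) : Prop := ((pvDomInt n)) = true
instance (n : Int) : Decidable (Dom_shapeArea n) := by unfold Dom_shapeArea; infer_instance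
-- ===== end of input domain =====

-- ===== PORT A =====
-- while loop of A as structural recursion on (n-2).toNat
def shapeAreaLoop (n result : Int) : Int :=
  if h : 0 < n - 2 then shapeAreaLoop (n - 1) (result + (n - 2) * 4) else result
termination_by (n - 2).toNat
decreasing_by omega

def shapeArea (n : Int) : Int :=
  if n ≤ 1 then n
  else
    let result := 1 + 4 * (n - 1)
    if 2 < n then shapeAreaLoop n result else result

-- ===== PORT B =====
def shapeArea_alt (n : Int) : Int :=
  if n ≤ 1 then n else 2 * n * n - 2 * n + 1

-- ===== PRECONDITION & SPEC =====
def Spec_shapeArea (n : Int) (out : Int) : Prop := out = shapeArea_alt n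
instance (n : Int) (out : Int) : Decidable (Spec_shapeArea n out) := by unfold Spec_shapeArea; infer_instance

-- ===== CLAIM (what is proved, stated in full; the proofs are below) =====
def Claim_equal_shapeArea : Prop := ∀ (n : Int), Dom_shapeArea n → Spec_shapeArea n (shapeArea n)

-- ===== LEMMAS AND PROOFS =====

-- ===== VERDICT (by name: the statement is the Claim_ definition above) =====
theorem shapeAreaLoop_eq (k : Nat) : ∀ (n r : Int), 2 ≤ n → (n - 2).toNat = k →
    shapeAreaLoop n r = r + 2 * (n - 2) * (n - 1) := by
  induction k with
  | zero =>
    intro n r h2 h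
    have hn : n = 2 := by omega
    subst hn
    rw [shapeAreaLoop]
    norm_num
  | succ k ih =>
    intro n r h2 h
    rw [shapeAreaLoop]
    have hn : 0 < n - 2 := by omega
    rw [dif_pos hn, ih (n - 1) _ (by omega) (by omega)]
    ring

theorem shapeArea_spec : Claim_equal_shapeArea := by
  intro n _
  unfold Spec_shapeArea shapeArea shapeArea_alt
  by_cases h1 : n ≤ 1
  · simp [h1]
  · simp only [if_neg h1]
    by_cases h2 : 2 < n
    · rw [if_pos h2, shapeAreaLoop_eq (n - 2).toNat n _ (by omega) rfl]
      ring
    · have : n = 2 := by omega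
      subst this
      decide
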